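-- pv_equiv track=rewrite | github.com/AlpacaMale/programmers-coding-test | 공원_산책.py | solution
-- ===== SOURCE A (Python) =====
-- def solution(park, routes):
--     dog_pos = find_start(park)
--     max_x = len(park) - 1
--     max_y = len(park[0]) - 1
--     for route in routes:
--         index = 1 if route[0] in ["S", "E"] else -1
--         move = True
--         x_pos = dog_pos[0]
--         y_pos = dog_pos[1]
--         for _ in range(int(route[2])):
--             if (
--                 move
--                 and route[0] in ["N", "S"]
--                 and not (
--                     x_pos + index < 0
--                     or x_pos + index > max_x
--                     or park[x_pos + index][dog_pos[1]] == "X"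
--                 )
--             ):
--                 x_pos += index
--             elif (
--                 move
--                 and route[0] in ["E", "W"]
--                 and not (
--                     y_pos + index < 0
--                     or y_pos + index > max_y
--                     or park[dog_pos[0]][y_pos + index] == "X"
--                 )
--             ):
--                 y_pos += index
--             else:
--                 move = False
--         if move and route[0] in ["N", "S"]:
--             dog_pos[0] += index * int(route[2])
--         elif move and route[0] in ["E", "W"]:
--             dog_pos[1] += index * int(route[2])
--     return dog_pos
--
-- def find_start(park):
--     for row in range(len(park)):
--         if "S" in park[row]:
--             col = park[row].find("S")
--             return [row, col]
-- ===== SOURCE B (Python) =====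
-- def solution(park, routes):
--     r = c = 0
--     for i, row in enumerate(park):
--         j = row.find("S")
--         if j != -1:
--             r, c = i, j
--             break
--     rows, cols = len(park), len(park[0])
--     # rowx[i][k] = number of 'X' in park[i][:k]; colx[k][j] = number of 'X' in column j of park[:k]
--     rowx = []
--     for row in park:
--         acc = [0]
--         for ch in row:
--             acc.append(acc[-1] + (ch == "X"))
--         rowx.append(acc)
--     colx = [[0] * cols]
--     for row in park:
--         colx.append([p + (ch == "X") for p, ch in zip(colx[-1], row)])
--     for route in routes:
--         d, n = route[0], int(route[2])
--         if d == "N" and 0 <= r - n and colx[r][c] - colx[r - n][c] == 0: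
--             r -= n
--         elif d == "S" and r + n < rows and colx[r + 1 + n][c] - colx[r + 1][c] == 0:
--             r += n
--         elif d == "W" and 0 <= c - n and rowx[r][c] - rowx[r][c - n] == 0:
--             c -= n
--         elif d == "E" and c + n < cols and rowx[r][c + 1 + n] - rowx[r][c + 1] == 0:
--             c += n
--     return [r, c]
-- ===== Notes on version B (the rewrite author's own statement) =====
-- stated objective: alternative
-- what changed: A walks the dog cell by cell per route with a move flag and per-step bounds/obstacle checks; B precomputes prefix-sum tables of obstacle counts per row and per column once, then decides each route by a single endpoint bounds test plus one O(1) prefix-count subtraction - no walk along the path at all.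
-- outside the precondition, e.g. on solution(['W'], []): A returns None, B returns [0, 0]; on solution(['Sa', 'b'], ['E 1']): A returns [0, 1], B returns [0, 1]
import Mathlib
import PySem

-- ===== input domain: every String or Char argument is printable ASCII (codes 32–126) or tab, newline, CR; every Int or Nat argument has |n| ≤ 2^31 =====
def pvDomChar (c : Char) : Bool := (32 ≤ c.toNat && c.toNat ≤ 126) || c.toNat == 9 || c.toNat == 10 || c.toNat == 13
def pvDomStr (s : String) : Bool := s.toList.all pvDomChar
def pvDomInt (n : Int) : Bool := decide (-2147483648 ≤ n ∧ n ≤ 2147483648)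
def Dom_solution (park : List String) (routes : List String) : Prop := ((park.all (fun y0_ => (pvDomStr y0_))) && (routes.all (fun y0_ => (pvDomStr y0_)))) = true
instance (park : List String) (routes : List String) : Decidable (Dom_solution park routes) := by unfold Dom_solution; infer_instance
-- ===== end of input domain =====

-- B replaces A's cell-by-cell walking simulation (stepwise state machine with a `move`
-- flag) by prefix-sum tables of obstacle counts per row and per column, built once;
-- each route is then decided by an endpoint bounds test plus one prefix-count
-- subtraction, with no walk along the path — objective: alternative.

-- ===== PORT A =====
-- park[i][j] as an Option Char (none exactly where Python would raise)
def pvCell (park : List String) (i j : Int) : Option Char :=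
  PySem.Str.pyGet? ((PySem.List.pyGet? park i).getD "") j

-- find_start: loop over `range(len(park))`, return the first row containing "S"
def findStartA (park : List String) : List Int → Option (Int × Int)
  | [] => none
  | r :: rest =>
    let s := (PySem.List.pyGet? park r).getD ""
    if PySem.Str.isIn "S" s then some (r, PySem.Str.find s "S")
    else findStartA park rest

-- the body of `for route in routes:` — inner loop over range(int(route[2])) with state (move, x_pos, y_pos)
def stepA (park : List String) (maxX maxY : Int) (dp : Int × Int) (route : String) : Int × Int :=
  let r0 : Option Char := PySem.Str.pyGet? route 0
  let index : Int := if r0 = some 'S' ∨ r0 = some 'E' then 1 else -1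
  let n : Int := (PySem.Int.ofChars? [(PySem.Str.pyGet? route 2).getD ' ']).getD 0
  let st := (PySem.List.pyRange 0 n 1).foldl
    (fun (s : Bool × Int × Int) _ =>
      if s.1 ∧ (r0 = some 'N' ∨ r0 = some 'S') ∧
          ¬ (s.2.1 + index < 0 ∨ maxX < s.2.1 + index ∨ pvCell park (s.2.1 + index) dp.2 = some 'X')
      then (s.1, s.2.1 + index, s.2.2)
      else if s.1 ∧ (r0 = some 'E' ∨ r0 = some 'W') ∧
          ¬ (s.2.2 + index < 0 ∨ maxY < s.2.2 + index ∨ pvCell park dp.1 (s.2.2 + index) = some 'X')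
      then (s.1, s.2.1, s.2.2 + index)
      else (false, s.2.1, s.2.2))
    (true, dp.1, dp.2)
  if st.1 ∧ (r0 = some 'N' ∨ r0 = some 'S') then (dp.1 + index * n, dp.2)
  else if st.1 ∧ (r0 = some 'E' ∨ r0 = some 'W') then (dp.1, dp.2 + index * n)
  else dp

def solution (park : List String) (routes : List String) : List Int :=
  match findStartA park (PySem.List.pyRange 0 (park.length : Int) 1) with
  | none => []   -- Python raises TypeError here (find_start returned None); excluded by Pre_solution
  | some dp0 =>
    let maxX : Int := (park.length : Int) - 1
    let maxY : Int := PySem.Str.len ((PySem.List.pyGet? park 0).getD "") - 1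
    let dp := routes.foldl (stepA park maxX maxY) dp0
    [dp.1, dp.2]

-- ===== PORT B =====
-- `for i, row in enumerate(park): j = row.find("S"); if j != -1: r, c = i, j; break`
-- (r = c = 0 before the loop: the default when no row contains "S"; outside Pre_solution)
def findStartB : List (Int × String) → Int × Int
  | [] => (0, 0)
  | (i, row) :: rest =>
    let j : Int := PySem.Str.find row "S"
    if j ≠ -1 then (i, j) else findStartB rest

-- `acc = [0]; for ch in row: acc.append(acc[-1] + (ch == "X"))`
def prefX (cs : List Char) : List Int :=
  cs.foldl (fun acc ch => acc ++ [(PySem.List.pyGet? acc (-1)).getD 0 + (if ch = 'X' then 1 else 0)]) [0]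

-- `rowx = []; for row in park: rowx.append(<prefix of row>)`
def rowxB (park : List String) : List (List Int) :=
  park.foldl (fun rx row => rx ++ [prefX row.toList]) []

-- `colx = [[0]*cols]; for row in park: colx.append([p + (ch=="X") for p, ch in zip(colx[-1], row)])`
def colxB (park : List String) (cols : Int) : List (List Int) :=
  park.foldl
    (fun cx row => cx ++
      [List.zipWith (fun p ch => p + (if ch = 'X' then 1 else 0))
        ((PySem.List.pyGet? cx (-1)).getD []) row.toList])
    [List.replicate cols.toNat 0]

-- t[i][j] (the .getD 0 is only reached where Python would raise, outside Pre_solution)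
def at2 (t : List (List Int)) (i j : Int) : Int :=
  ((PySem.List.pyGet? t i).bind (fun l => PySem.List.pyGet? l j)).getD 0

-- one route: if-chain of endpoint bounds test + one prefix-count subtraction per direction
def stepB (rowx colx : List (List Int)) (rows cols : Int) (rc : Int × Int) (route : String) : Int × Int :=
  let d : Option Char := PySem.Str.pyGet? route 0
  let n : Int := (PySem.Int.ofChars? [(PySem.Str.pyGet? route 2).getD ' ']).getD 0
  if d = some 'N' ∧ 0 ≤ rc.1 - n ∧ at2 colx rc.1 rc.2 - at2 colx (rc.1 - n) rc.2 = 0 then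
    (rc.1 - n, rc.2)
  else if d = some 'S' ∧ rc.1 + n < rows ∧ at2 colx (rc.1 + 1 + n) rc.2 - at2 colx (rc.1 + 1) rc.2 = 0 then
    (rc.1 + n, rc.2)
  else if d = some 'W' ∧ 0 ≤ rc.2 - n ∧ at2 rowx rc.1 rc.2 - at2 rowx rc.1 (rc.2 - n) = 0 then
    (rc.1, rc.2 - n)
  else if d = some 'E' ∧ rc.2 + n < cols ∧ at2 rowx rc.1 (rc.2 + 1 + n) - at2 rowx rc.1 (rc.2 + 1) = 0 then
    (rc.1, rc.2 + n)
  else rc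

def solution_alt (park : List String) (routes : List String) : List Int :=
  let rc0 := findStartB (PySem.List.enumerate park)
  let rows : Int := (park.length : Int)
  let cols : Int := PySem.Str.len ((PySem.List.pyGet? park 0).getD "")
  let rowx := rowxB park
  let colx := colxB park cols
  let rc := routes.foldl (stepB rowx colx rows cols) rc0
  [rc.1, rc.2]

-- ===== PRECONDITION & SPEC =====
-- Pre_ excludes the inputs where Python A raises or leaves the declared type: an empty park
-- or one without "S" (find_start gives None: A raises TypeError on any route and returns
-- None — not a list — when routes is empty), routes shorter than 3 characters or with a
-- non-digit route[2] (IndexError/ValueError), and — as a closed-form over-approximation,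
-- only when routes is nonempty — all non-rectangular parks, on which A's obstacle checks
-- can index a row shorter than the current column and raise IndexError (A bounds columns
-- only by len(park[0])); some ragged parks on which A happens to return (routes that never
-- reach a short row) are excluded too.
def Pre_solution (park : List String) (routes : List String) : Prop :=
  park ≠ [] ∧
  (∃ s ∈ park, PySem.Str.isIn "S" s = true) ∧
  (routes = [] ∨
    ((∀ s ∈ park, PySem.Str.len s = PySem.Str.len ((PySem.List.pyGet? park 0).getD "")) ∧
     (∀ r ∈ routes, 3 ≤ PySem.Str.len r ∧
       r.toList.getD 2 ' ' ∈ ['0','1','2','3','4','5','6','7','8','9'])))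
instance (park : List String) (routes : List String) : Decidable (Pre_solution park routes) := by
  unfold Pre_solution; infer_instance

def pvWitness_solution : List String × List String := (["SO", "OX"], ["E 1", "S 1"])

def Spec_solution (park : List String) (routes : List String) (out : List Int) : Prop := out = solution_alt park routes
instance (park : List String) (routes : List String) (out : List Int) : Decidable (Spec_solution park routes out) := by unfold Spec_solution; infer_instance

-- ===== CLAIM (what is proved, stated in full; the proofs are below) =====
def Claim_equal_solution : Prop := ∀ (park : List String) (routes : List String), Dom_solution park routes → Pre_solution park routes → Spec_solution park routes (solution park routes)

-- ===== LEMMAS AND PROOFS =====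

-- number of columns (both ports read it from park[0])
def pvCols (park : List String) : Int := PySem.Str.len ((PySem.List.pyGet? park 0).getD "")

-- the position invariant: inside the grid
def pvInB (park : List String) (p : Int × Int) : Prop :=
  0 ≤ p.1 ∧ p.1 < (park.length : Int) ∧ 0 ≤ p.2 ∧ p.2 < pvCols park

-- digits give a nonnegative int
lemma pv_digit_nonneg (c : Char) (h : c ∈ ['0','1','2','3','4','5','6','7','8','9']) :
    0 ≤ (PySem.Int.ofChars? [c]).getD 0 := by
  fin_cases h <;> decide

-- abstract one step of A's inner walk on (move, moving coordinate)
def pvG (d : Int) (P : Int → Prop) [DecidablePred P] (s : Bool × Int) : Bool × Int :=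
  if s.1 ∧ P (s.2 + d) then (s.1, s.2 + d) else (false, s.2)

lemma pvG_false (d : Int) (P : Int → Prop) [DecidablePred P] :
    ∀ (n : ℕ) (x : Int), (pvG d P)^[n] (false, x) = (false, x) := by
  intro n
  induction n with
  | zero => intro x; rfl
  | succ k ih =>
    intro x
    rw [Function.iterate_succ_apply]
    have : pvG d P (false, x) = (false, x) := by simp [pvG]
    rw [this, ih]

lemma pvG_all (d : Int) (P : Int → Prop) [DecidablePred P] :
    ∀ (n : ℕ) (x0 : Int), (∀ i : ℕ, 1 ≤ i → i ≤ n → P (x0 + d * (i : Int))) →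
      (pvG d P)^[n] (true, x0) = (true, x0 + d * n) := by
  intro n
  induction n with
  | zero => intro x0 _; simp
  | succ k ih =>
    intro x0 h
    rw [Function.iterate_succ_apply]
    have h1 : P (x0 + d) := by simpa using h 1 (by omega) (by omega)
    have : pvG d P (true, x0) = (true, x0 + d) := by simp [pvG, h1]
    rw [this, ih (x0 + d) ?_]
    · congr 1; push_cast; ring
    · intro i hi1 hik
      have e : x0 + d + d * (i : Int) = x0 + d * ((i + 1 : ℕ) : Int) := by push_cast; ring
      rw [e]
      exact h (i + 1) (by omega) (by omega)

lemma pvG_not_all (d : Int) (P : Int → Prop) [DecidablePred P] :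
    ∀ (n : ℕ) (x0 : Int), ¬ (∀ i : ℕ, 1 ≤ i → i ≤ n → P (x0 + d * (i : Int))) →
      ((pvG d P)^[n] (true, x0)).1 = false := by
  intro n
  induction n with
  | zero => intro x0 h; exact absurd (fun i h1 h2 => absurd h2 (by omega)) h
  | succ k ih =>
    intro x0 h
    rw [Function.iterate_succ_apply]
    by_cases h1 : P (x0 + d)
    · have : pvG d P (true, x0) = (true, x0 + d) := by simp [pvG, h1]
      rw [this]
      apply ih
      intro hall
      apply h
      intro i hi1 hik
      rcases Nat.exists_eq_add_of_le hi1 with ⟨j, rfl⟩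
      cases j with
      | zero => simpa using h1
      | succ m =>
        have e : x0 + d * ((1 + (m + 1) : ℕ) : Int) = x0 + d + d * ((m + 1 : ℕ) : Int) := by
          push_cast; ring
        rw [e]
        exact hall (m + 1) (by omega) (by omega)
    · have : pvG d P (true, x0) = (false, x0) := by simp [pvG, h1]
      rw [this, pvG_false]

-- lift pvG to A's 3-tuple state, moving the second component (N/S) or the third (E/W)
def pvLiftX (f : Bool × Int → Bool × Int) (s : Bool × Int × Int) : Bool × Int × Int :=
  ((f (s.1, s.2.1)).1, (f (s.1, s.2.1)).2, s.2.2)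

def pvLiftY (f : Bool × Int → Bool × Int) (s : Bool × Int × Int) : Bool × Int × Int :=
  ((f (s.1, s.2.2)).1, s.2.1, (f (s.1, s.2.2)).2)

lemma pvLiftX_iterate (f : Bool × Int → Bool × Int) :
    ∀ (n : ℕ) (m : Bool) (x y : Int),
      (pvLiftX f)^[n] (m, x, y) = ((f^[n] (m, x)).1, (f^[n] (m, x)).2, y) := by
  intro n
  induction n with
  | zero => intro m x y; rfl
  | succ k ih =>
    intro m x y
    rw [Function.iterate_succ_apply, Function.iterate_succ_apply]
    show (pvLiftX f)^[k] ((f (m, x)).1, (f (m, x)).2, y) = _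
    rw [ih]

lemma pvLiftY_iterate (f : Bool × Int → Bool × Int) :
    ∀ (n : ℕ) (m : Bool) (x y : Int),
      (pvLiftY f)^[n] (m, x, y) = ((f^[n] (m, y)).1, x, (f^[n] (m, y)).2) := by
  intro n
  induction n with
  | zero => intro m x y; rfl
  | succ k ih =>
    intro m x y
    rw [Function.iterate_succ_apply, Function.iterate_succ_apply]
    show (pvLiftY f)^[k] ((f (m, y)).1, x, (f (m, y)).2) = _
    rw [ih]

-- A's stepwise condition ↔ endpoint bounds + obstacle scan (monotone motion)
lemma pv_cond_iff (d B v0 n : Int) (hd : d = 1 ∨ d = -1) (hn : 0 ≤ n)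
    (hv0 : 0 ≤ v0) (hv1 : v0 < B) (cell : Int → Option Char) :
    (∀ i : ℕ, 1 ≤ i → i ≤ n.toNat →
        ¬ (v0 + d * (i : Int) < 0 ∨ B - 1 < v0 + d * (i : Int) ∨ cell (v0 + d * (i : Int)) = some 'X'))
    ↔ (0 ≤ v0 + d * n ∧ v0 + d * n < B ∧
        ∀ i : Int, 1 ≤ i → i < n + 1 → ¬ cell (v0 + d * i) = some 'X') := by
  constructor
  · intro h
    have hc : ((n.toNat : ℕ) : Int) = n := Int.toNat_of_nonneg hn
    rcases eq_or_lt_of_le hn with heq | hpos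
    · have hn0 : n = 0 := heq.symm
      subst hn0
      refine ⟨by simpa using hv0, by simpa using hv1, ?_⟩
      intro i hi1 hi2
      exact absurd hi2 (by omega)
    · have hbig := h n.toNat (by omega) le_rfl
      push_neg at hbig
      rw [hc] at hbig
      refine ⟨by omega, by omega, ?_⟩
      intro i hi1 hi2
      have hthis := h i.toNat (by omega) (by omega)
      push_neg at hthis
      have hci : ((i.toNat : ℕ) : Int) = i := Int.toNat_of_nonneg (by omega)
      rw [hci] at hthis
      exact hthis.2.2
  · rintro ⟨h1, h2, h3⟩ i hi1 hin
    push_neg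
    have hi : 1 ≤ (i : Int) ∧ (i : Int) ≤ n := by omega
    refine ⟨?_, ?_, h3 i (by omega) (by omega)⟩
    · rcases hd with rfl | rfl <;> omega
    · rcases hd with rfl | rfl <;> omega

-- characterization of stepA, one lemma per direction letter family (N/S move the row, E/W the column)
lemma pv_stepA_NS (park : List String) (maxX maxY : Int) (p : Int × Int) (route : String)
    (c0 : Char) (d : Int)
    (hr0 : PySem.Str.pyGet? route 0 = some c0)
    (hd : (if c0 = 'S' ∨ c0 = 'E' then (1 : Int) else -1) = d)
    (hNS : c0 = 'N' ∨ c0 = 'S') (hEW : ¬ (c0 = 'E' ∨ c0 = 'W')) :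
    stepA park maxX maxY p route =
      (if (∀ i : ℕ, 1 ≤ i → i ≤ ((PySem.Int.ofChars? [(PySem.Str.pyGet? route 2).getD ' ']).getD 0).toNat →
            ¬ (p.1 + d * (i : Int) < 0 ∨ maxX < p.1 + d * (i : Int) ∨ pvCell park (p.1 + d * (i : Int)) p.2 = some 'X'))
       then (p.1 + d * ((PySem.Int.ofChars? [(PySem.Str.pyGet? route 2).getD ' ']).getD 0), p.2) else p) := by
  have hd' : (if (some c0 : Option Char) = some 'S' ∨ (some c0 : Option Char) = some 'E' then (1 : Int) else -1) = d := by
    simpa using hd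
  have hNS' : ((some c0 : Option Char) = some 'N' ∨ (some c0 : Option Char) = some 'S') = True := by
    simp only [Option.some.injEq]; exact eq_true hNS
  have hEW' : ((some c0 : Option Char) = some 'E' ∨ (some c0 : Option Char) = some 'W') = False := by
    simp only [Option.some.injEq]; exact eq_false hEW
  unfold stepA
  rw [hr0]
  simp only [hd', hNS', hEW', and_true, true_and, false_and, and_false, if_false, ite_false,
    if_true, ite_true]
  generalize (PySem.Int.ofChars? [(PySem.Str.pyGet? route 2).getD ' ']).getD 0 = n
  set P : Int → Prop := fun z => ¬ (z < 0 ∨ maxX < z ∨ pvCell park z p.2 = some 'X') with hP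
  have hcongr : ∀ (acc : Bool × Int × Int), ∀ x ∈ PySem.List.pyRange 0 n,
      (fun (s : Bool × Int × Int) (_ : Int) =>
        if s.1 = true ∧ ¬ (s.2.1 + d < 0 ∨ maxX < s.2.1 + d ∨ pvCell park (s.2.1 + d) p.2 = some 'X')
        then (s.1, s.2.1 + d, s.2.2) else (false, s.2.1, s.2.2)) acc x
      = (fun (s : Bool × Int × Int) (_ : Int) => pvLiftX (pvG d P) s) acc x := by
    intro acc x _
    obtain ⟨m, x1, y1⟩ := acc
    simp only [pvLiftX, pvG, hP]
    split_ifs <;> rfl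
  rw [PySem.List.foldl_congr_mem _ _ _ _ hcongr, List.foldl_const,
    PySem.List.length_pyRange_one, Int.sub_zero, pvLiftX_iterate]
  by_cases hall : ∀ i : ℕ, 1 ≤ i → i ≤ n.toNat → P (p.1 + d * (i : Int))
  · have h1 : ((pvG d P)^[n.toNat] (true, p.1)).1 = true := by
      rw [pvG_all d P n.toNat p.1 hall]
    rw [if_pos h1, if_pos (show ∀ i : ℕ, 1 ≤ i → i ≤ n.toNat →
      ¬ (p.1 + d * (i : Int) < 0 ∨ maxX < p.1 + d * (i : Int) ∨ pvCell park (p.1 + d * (i : Int)) p.2 = some 'X') from hall)]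
  · have h1 : ((pvG d P)^[n.toNat] (true, p.1)).1 = false := pvG_not_all d P n.toNat p.1 hall
    rw [if_neg (by simp [h1]), if_neg (show ¬ ∀ i : ℕ, 1 ≤ i → i ≤ n.toNat →
      ¬ (p.1 + d * (i : Int) < 0 ∨ maxX < p.1 + d * (i : Int) ∨ pvCell park (p.1 + d * (i : Int)) p.2 = some 'X') from hall)]

lemma pv_stepA_EW (park : List String) (maxX maxY : Int) (p : Int × Int) (route : String)
    (c0 : Char) (d : Int)
    (hr0 : PySem.Str.pyGet? route 0 = some c0)
    (hd : (if c0 = 'S' ∨ c0 = 'E' then (1 : Int) else -1) = d)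
    (hNS : ¬ (c0 = 'N' ∨ c0 = 'S')) (hEW : c0 = 'E' ∨ c0 = 'W') :
    stepA park maxX maxY p route =
      (if (∀ i : ℕ, 1 ≤ i → i ≤ ((PySem.Int.ofChars? [(PySem.Str.pyGet? route 2).getD ' ']).getD 0).toNat →
            ¬ (p.2 + d * (i : Int) < 0 ∨ maxY < p.2 + d * (i : Int) ∨ pvCell park p.1 (p.2 + d * (i : Int)) = some 'X'))
       then (p.1, p.2 + d * ((PySem.Int.ofChars? [(PySem.Str.pyGet? route 2).getD ' ']).getD 0)) else p) := by
  have hd' : (if (some c0 : Option Char) = some 'S' ∨ (some c0 : Option Char) = some 'E' then (1 : Int) else -1) = d := by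
    simpa using hd
  have hNS' : ((some c0 : Option Char) = some 'N' ∨ (some c0 : Option Char) = some 'S') = False := by
    simp only [Option.some.injEq]; exact eq_false hNS
  have hEW' : ((some c0 : Option Char) = some 'E' ∨ (some c0 : Option Char) = some 'W') = True := by
    simp only [Option.some.injEq]; exact eq_true hEW
  unfold stepA
  rw [hr0]
  simp only [hd', hNS', hEW', and_true, true_and, false_and, and_false, if_false, ite_false,
    if_true, ite_true]
  generalize (PySem.Int.ofChars? [(PySem.Str.pyGet? route 2).getD ' ']).getD 0 = n
  set P : Int → Prop := fun z => ¬ (z < 0 ∨ maxY < z ∨ pvCell park p.1 z = some 'X') with hP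
  have hcongr : ∀ (acc : Bool × Int × Int), ∀ x ∈ PySem.List.pyRange 0 n,
      (fun (s : Bool × Int × Int) (_ : Int) =>
        if s.1 = true ∧ ¬ (s.2.2 + d < 0 ∨ maxY < s.2.2 + d ∨ pvCell park p.1 (s.2.2 + d) = some 'X')
        then (s.1, s.2.1, s.2.2 + d) else (false, s.2.1, s.2.2)) acc x
      = (fun (s : Bool × Int × Int) (_ : Int) => pvLiftY (pvG d P) s) acc x := by
    intro acc x _
    obtain ⟨m, x1, y1⟩ := acc
    simp only [pvLiftY, pvG, hP]
    split_ifs <;> rfl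
  rw [PySem.List.foldl_congr_mem _ _ _ _ hcongr, List.foldl_const,
    PySem.List.length_pyRange_one, Int.sub_zero, pvLiftY_iterate]
  by_cases hall : ∀ i : ℕ, 1 ≤ i → i ≤ n.toNat → P (p.2 + d * (i : Int))
  · have h1 : ((pvG d P)^[n.toNat] (true, p.2)).1 = true := by
      rw [pvG_all d P n.toNat p.2 hall]
    rw [if_pos h1, if_pos (show ∀ i : ℕ, 1 ≤ i → i ≤ n.toNat →
      ¬ (p.2 + d * (i : Int) < 0 ∨ maxY < p.2 + d * (i : Int) ∨ pvCell park p.1 (p.2 + d * (i : Int)) = some 'X') from hall)]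
  · have h1 : ((pvG d P)^[n.toNat] (true, p.2)).1 = false := pvG_not_all d P n.toNat p.2 hall
    rw [if_neg (by simp [h1]), if_neg (show ¬ ∀ i : ℕ, 1 ≤ i → i ≤ n.toNat →
      ¬ (p.2 + d * (i : Int) < 0 ∨ maxY < p.2 + d * (i : Int) ∨ pvCell park p.1 (p.2 + d * (i : Int)) = some 'X') from hall)]

lemma pv_stepA_skip (park : List String) (maxX maxY : Int) (p : Int × Int) (route : String)
    (c0 : Char) (hr0 : PySem.Str.pyGet? route 0 = some c0)
    (hNS : ¬ (c0 = 'N' ∨ c0 = 'S')) (hEW : ¬ (c0 = 'E' ∨ c0 = 'W')) :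
    stepA park maxX maxY p route = p := by
  have hNS' : ((some c0 : Option Char) = some 'N' ∨ (some c0 : Option Char) = some 'S') = False := by
    simp only [Option.some.injEq]; exact eq_false hNS
  have hEW' : ((some c0 : Option Char) = some 'E' ∨ (some c0 : Option Char) = some 'W') = False := by
    simp only [Option.some.injEq]; exact eq_false hEW
  unfold stepA
  rw [hr0]
  simp only [hNS', hEW', false_and, and_false, if_false, ite_false]

-- ===== B-side lemmas: the prefix tables count obstacles =====

-- number of 'X' among the first k characters of a row
def cntR (cs : List Char) (k : Nat) : Int := ((cs.take k).countP (fun ch => ch == 'X') : Int)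

-- number of 'X' in column j among the first k rows
def cntC (park : List String) (j : Nat) (k : Nat) : Int :=
  ((park.take k).countP (fun row => row.toList.getD j ' ' == 'X') : Int)

lemma cntR_snoc (cs : List Char) (ch : Char) :
    cntR (cs ++ [ch]) (cs.length + 1) = cntR cs cs.length + (if ch = 'X' then 1 else 0) := by
  unfold cntR
  rw [List.take_of_length_le (by simp), List.take_of_length_le (le_refl _), List.countP_append]
  by_cases h : ch = 'X' <;> simp [h]

lemma cntR_prefix (cs : List Char) (ch : Char) (k : Nat) (hk : k ≤ cs.length) :
    cntR (cs ++ [ch]) k = cntR cs k := by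
  unfold cntR
  rw [List.take_append_of_le_length hk]

lemma prefX_eq (cs : List Char) : prefX cs = (List.range (cs.length+1)).map (fun k => cntR cs k) := by
  induction cs using List.reverseRecOn with
  | nil => simp [prefX, cntR]
  | append_singleton cs ch ih =>
    have step : prefX (cs ++ [ch]) = prefX cs ++ [(PySem.List.pyGet? (prefX cs) (-1)).getD 0 + (if ch = 'X' then 1 else 0)] := by
      simp [prefX, List.foldl_append]
    have hlast : (PySem.List.pyGet? (prefX cs) (-1)).getD 0 = cntR cs cs.length := by
      rw [PySem.List.pyGet?_neg_one, ih, List.getLast?_map]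
      simp [List.range_succ]
    rw [step, hlast]
    have hlen : (cs ++ [ch]).length + 1 = (cs.length + 1) + 1 := by simp
    rw [hlen]
    conv_rhs => rw [List.range_succ, List.map_append]
    congr 1
    · rw [ih]
      apply List.map_congr_left
      intro k hk
      rw [List.mem_range] at hk
      exact (cntR_prefix cs ch k (by omega)).symm
    · simp only [List.map_cons, List.map_nil]
      rw [cntR_snoc]

lemma rowxB_eq (park : List String) : rowxB park = park.map (fun s => prefX s.toList) := by
  have := PySem.List.foldl_append_singleton_eq_map (l := park) (f := fun s => prefX s.toList) (acc := [])
  simpa [rowxB] using this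

lemma zipWith_map_range (cols : Nat) (f : Nat → Int) (row : List Char) (hrow : row.length = cols) :
    List.zipWith (fun p ch => p + (if ch = 'X' then 1 else 0)) ((List.range cols).map f) row
      = (List.range cols).map (fun j => f j + (if row.getD j ' ' = 'X' then 1 else 0)) := by
  apply List.ext_getElem
  · simp [hrow]
  · intro i h1 h2
    simp only [List.getElem_zipWith, List.getElem_map, List.getElem_range]
    congr 1
    have hi : i < row.length := by simp at h1; omega
    rw [List.getD_eq_getElem row ' ' hi]

lemma cntC_snoc (park : List String) (row : String) (j : Nat) :
    cntC (park ++ [row]) j (park.length + 1)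
      = cntC park j park.length + (if row.toList.getD j ' ' = 'X' then 1 else 0) := by
  unfold cntC
  rw [List.take_of_length_le (by simp), List.take_of_length_le (le_refl _), List.countP_append]
  by_cases h : row.toList.getD j ' ' = 'X' <;> simp [h]

lemma cntC_prefix (park : List String) (row : String) (j k : Nat) (hk : k ≤ park.length) :
    cntC (park ++ [row]) j k = cntC park j k := by
  unfold cntC
  rw [List.take_append_of_le_length hk]

lemma colxB_eq (park : List String) (cols : Nat) (hrect : ∀ s ∈ park, s.toList.length = cols) :
    colxB park (cols : Int)
      = (List.range (park.length+1)).map (fun k => (List.range cols).map (fun j => cntC park j k)) := by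
  induction park using List.reverseRecOn with
  | nil =>
    simp only [colxB, List.foldl_nil, List.length_nil, Nat.zero_add, List.range_one,
      List.map_cons, List.map_nil]
    congr 1
    apply List.ext_getElem <;> simp [cntC]
  | append_singleton park row ih =>
    have hrect' : ∀ s ∈ park, s.toList.length = cols := fun s hs => hrect s (by simp [hs])
    have step : colxB (park ++ [row]) cols = colxB park cols ++
        [List.zipWith (fun p ch => p + (if ch = 'X' then 1 else 0))
          ((PySem.List.pyGet? (colxB park cols) (-1)).getD []) row.toList] := by
      simp [colxB, List.foldl_append]
    have hlast : (PySem.List.pyGet? (colxB park cols) (-1)).getD []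
        = (List.range cols).map (fun j => cntC park j park.length) := by
      rw [PySem.List.pyGet?_neg_one, ih hrect', List.getLast?_map]
      simp [List.range_succ]
    rw [step, hlast, ih hrect',
      zipWith_map_range cols _ row.toList (hrect row (by simp))]
    have hlen : (park ++ [row]).length + 1 = (park.length + 1) + 1 := by simp
    rw [hlen]
    conv_rhs => rw [List.range_succ, List.map_append]
    congr 1
    · apply List.map_congr_left
      intro k hk
      rw [List.mem_range] at hk
      apply List.map_congr_left
      intro j _
      exact (cntC_prefix park row j k (by omega)).symm
    · simp only [List.map_cons, List.map_nil]
      congr 1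
      apply List.map_congr_left
      intro j _
      rw [cntC_snoc]

lemma at2_colx (park : List String) (cols : Nat) (hrect : ∀ s ∈ park, s.toList.length = cols)
    (k j : Nat) (hk : k ≤ park.length) (hj : j < cols) :
    at2 (colxB park (cols : Int)) (k : Int) (j : Int) = cntC park j k := by
  rw [at2, colxB_eq park cols hrect]
  rw [PySem.List.pyGet?_natCast]
  rw [List.getElem?_map, List.getElem?_range (by omega)]
  simp only [Option.map_some, Option.bind_some]
  rw [PySem.List.pyGet?_natCast, List.getElem?_map, List.getElem?_range hj]
  rfl

lemma at2_rowx (park : List String) (r k : Nat) (hr : r < park.length)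
    (hk : k ≤ park[r].toList.length) :
    at2 (rowxB park) (r : Int) (k : Int) = cntR park[r].toList k := by
  rw [at2, rowxB_eq, PySem.List.pyGet?_natCast, List.getElem?_map, List.getElem?_eq_getElem hr]
  simp only [Option.map_some, Option.bind_some]
  rw [prefX_eq, PySem.List.pyGet?_natCast, List.getElem?_map, List.getElem?_range (by omega)]
  rfl

lemma cnt_diff_row (cs : List Char) (a b : Nat) (hab : a ≤ b) (hb : b ≤ cs.length) :
    (cntR cs b - cntR cs a = 0) ↔ (∀ i : Nat, a ≤ i → i < b → ¬ cs.getD i ' ' = 'X') := by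
  have hsplit : cs.take b = cs.take a ++ (cs.drop a).take (b - a) := by
    have : b = a + (b - a) := by omega
    rw [this, List.take_add]
    have h2 : a + (b - a) - a = b - a := by omega
    rw [h2]
  have hcnt : cntR cs b - cntR cs a = (((cs.drop a).take (b - a)).countP (fun ch => ch == 'X') : Int) := by
    unfold cntR
    rw [hsplit, List.countP_append]
    push_cast; ring
  rw [hcnt]
  constructor
  · intro h i hai hib
    have h0 : ((cs.drop a).take (b - a)).countP (fun ch => ch == 'X') = 0 := by exact_mod_cast h
    rw [List.countP_eq_zero] at h0
    have hmem : cs.getD i ' ' ∈ (cs.drop a).take (b - a) := by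
      have hi : i < cs.length := by omega
      rw [List.getD_eq_getElem cs ' ' hi]
      rw [List.mem_iff_getElem]
      refine ⟨i - a, by simp; omega, ?_⟩
      rw [List.getElem_take, List.getElem_drop]
      congr 1; omega
    have := h0 _ hmem
    simpa using this
  · intro h
    have h0 : ((cs.drop a).take (b - a)).countP (fun ch => ch == 'X') = 0 := by
      rw [List.countP_eq_zero]
      intro x hx
      rw [List.mem_iff_getElem] at hx
      obtain ⟨t, ht, rfl⟩ := hx
      rw [List.getElem_take, List.getElem_drop]
      have hseglen : ((cs.drop a).take (b - a)).length = b - a := by simp; omega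
      have hi : a + t < cs.length := by rw [hseglen] at ht; omega
      have := h (a + t) (by omega) (by rw [hseglen] at ht; omega)
      rw [List.getD_eq_getElem cs ' ' hi] at this
      simpa using this
    rw [h0]; simp

lemma cnt_diff_col (park : List String) (j : Nat) (a b : Nat) (hab : a ≤ b) (hb : b ≤ park.length) :
    (cntC park j b - cntC park j a = 0) ↔
      (∀ i : Nat, a ≤ i → i < b → ¬ (park.getD i "").toList.getD j ' ' = 'X') := by
  have hsplit : park.take b = park.take a ++ (park.drop a).take (b - a) := by
    have : b = a + (b - a) := by omega
    rw [this, List.take_add]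
    have h2 : a + (b - a) - a = b - a := by omega
    rw [h2]
  have hcnt : cntC park j b - cntC park j a
      = (((park.drop a).take (b - a)).countP (fun row => row.toList.getD j ' ' == 'X') : Int) := by
    unfold cntC
    rw [hsplit, List.countP_append]
    push_cast; ring
  rw [hcnt]
  constructor
  · intro h i hai hib
    have h0 : ((park.drop a).take (b - a)).countP (fun row => row.toList.getD j ' ' == 'X') = 0 := by
      exact_mod_cast h
    rw [List.countP_eq_zero] at h0
    have hi : i < park.length := by omega
    have hmem : park[i] ∈ (park.drop a).take (b - a) := by
      rw [List.mem_iff_getElem]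
      refine ⟨i - a, by simp; omega, ?_⟩
      rw [List.getElem_take, List.getElem_drop]
      congr 1; omega
    have := h0 _ hmem
    rw [List.getD_eq_getElem park "" hi]
    simpa using this
  · intro h
    have h0 : ((park.drop a).take (b - a)).countP (fun row => row.toList.getD j ' ' == 'X') = 0 := by
      rw [List.countP_eq_zero]
      intro x hx
      rw [List.mem_iff_getElem] at hx
      obtain ⟨t, ht, rfl⟩ := hx
      rw [List.getElem_take, List.getElem_drop]
      have hlen : ((park.drop a).take (b-a)).length = b - a := by simp; omega
      have hi : a + t < park.length := by rw [hlen] at ht; omega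
      have := h (a + t) (by omega) (by rw [hlen] at ht; omega)
      rw [List.getD_eq_getElem park "" hi] at this
      simpa using this
    rw [h0]; simp

lemma pvCell_eq (park : List String) (x y : Int) (hx0 : 0 ≤ x) (hx : x.toNat < park.length)
    (hy0 : 0 ≤ y) (hy : y.toNat < (park.getD x.toNat "").toList.length) :
    pvCell park x y = some ((park.getD x.toNat "").toList.getD y.toNat ' ') := by
  unfold pvCell
  rw [PySem.List.pyGet?_eq_some_getElem park hx0 (by omega)]
  simp only [Option.getD_some]
  have hg : park[x.toNat] = park.getD x.toNat "" := (List.getD_eq_getElem park "" hx).symm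
  rw [hg, PySem.Str.pyGet?_eq]
  show PySem.List.pyGet? (park.getD x.toNat "").toList y = _
  rw [PySem.List.pyGet?_eq_some_getElem _ hy0 (by omega)]
  rw [List.getD_eq_getElem _ ' ' hy]

lemma rect_getD (park : List String) (cols : Nat)
    (hrect : ∀ s ∈ park, s.toList.length = cols) (i : Nat) (hi : i < park.length) :
    (park.getD i "").toList.length = cols := by
  rw [List.getD_eq_getElem park "" hi]
  exact hrect _ (List.getElem_mem _)

lemma colDiff_iff (park : List String) (cols : Nat)
    (hrect : ∀ s ∈ park, s.toList.length = cols) (c a b : Int)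
    (h0 : 0 ≤ a) (hab : a ≤ b) (hb : b ≤ (park.length : Int)) (hc0 : 0 ≤ c) (hc : c.toNat < cols) :
    (at2 (colxB park (cols : Int)) b c - at2 (colxB park (cols : Int)) a c = 0)
      ↔ ∀ x : Int, a ≤ x → x < b → ¬ pvCell park x c = some 'X' := by
  have ha' : a = ((a.toNat : Nat) : Int) := by omega
  have hb' : b = ((b.toNat : Nat) : Int) := by omega
  have hc' : c = ((c.toNat : Nat) : Int) := by omega
  rw [ha', hb', hc']
  rw [at2_colx park cols hrect b.toNat c.toNat (by omega) hc,
      at2_colx park cols hrect a.toNat c.toNat (by omega) hc]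
  rw [cnt_diff_col park c.toNat a.toNat b.toNat (by omega) (by omega)]
  constructor
  · intro h x hax hxb
    have hx0 : 0 ≤ x := by omega
    have hxlen : x.toNat < park.length := by omega
    have hrow : (park.getD x.toNat "").toList.length = cols := rect_getD park cols hrect _ hxlen
    rw [pvCell_eq park x ((c.toNat : Nat) : Int) hx0 hxlen (by omega) (by rw [hrow]; omega)]
    have := h x.toNat (by omega) (by omega)
    simp only [Int.toNat_natCast, Option.some.injEq]
    exact this
  · intro h i hai hib
    have := h ((i : Nat) : Int) (by omega) (by omega)
    have hxlen : i < park.length := by omega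
    have hrow : (park.getD i "").toList.length = cols := rect_getD park cols hrect _ hxlen
    rw [pvCell_eq park ((i : Nat) : Int) ((c.toNat : Nat) : Int) (by omega) (by omega) (by omega)
      (by simp only [Int.toNat_natCast]; rw [hrow]; omega)] at this
    simp only [Int.toNat_natCast, Option.some.injEq] at this
    exact this

lemma rowDiff_iff (park : List String) (cols : Nat)
    (hrect : ∀ s ∈ park, s.toList.length = cols) (r a b : Int)
    (hr0 : 0 ≤ r) (hr : r.toNat < park.length)
    (h0 : 0 ≤ a) (hab : a ≤ b) (hb : b ≤ (cols : Int)) :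
    (at2 (rowxB park) r b - at2 (rowxB park) r a = 0)
      ↔ ∀ y : Int, a ≤ y → y < b → ¬ pvCell park r y = some 'X' := by
  have ha' : a = ((a.toNat : Nat) : Int) := by omega
  have hb' : b = ((b.toNat : Nat) : Int) := by omega
  have hr' : r = ((r.toNat : Nat) : Int) := by omega
  have hrow : park[r.toNat].toList.length = cols := hrect _ (List.getElem_mem _)
  rw [ha', hb', hr']
  rw [at2_rowx park r.toNat b.toNat hr (by omega),
      at2_rowx park r.toNat a.toNat hr (by omega)]
  rw [cnt_diff_row park[r.toNat].toList a.toNat b.toNat (by omega) (by omega)]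
  have hgd : park.getD r.toNat "" = park[r.toNat] := List.getD_eq_getElem park "" hr
  constructor
  · intro h y hay hyb
    rw [pvCell_eq park ((r.toNat : Nat) : Int) y (by omega) (by omega) (by omega)
      (by simp only [Int.toNat_natCast]; rw [hgd, hrow]; omega)]
    have := h y.toNat (by omega) (by omega)
    simp only [Int.toNat_natCast, Option.some.injEq, hgd]
    exact this
  · intro h i hai hib
    have := h ((i : Nat) : Int) (by omega) (by omega)
    rw [pvCell_eq park ((r.toNat : Nat) : Int) ((i : Nat) : Int) (by omega) (by omega) (by omega)
      (by simp only [Int.toNat_natCast]; rw [hgd, hrow]; omega)] at this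
    simp only [Int.toNat_natCast, Option.some.injEq, hgd] at this
    exact this

-- reindex an interval scan by the step number of the walk
lemma quant_shift_down (Q : Int → Prop) (v0 n : Int) :
    (∀ x : Int, v0 - n ≤ x → x < v0 → ¬ Q x) ↔
      (∀ i : Int, 1 ≤ i → i < n + 1 → ¬ Q (v0 + (-1) * i)) := by
  constructor
  · intro h i h1 h2
    have e : v0 + (-1) * i = v0 - i := by ring
    rw [e]
    exact h (v0 - i) (by omega) (by omega)
  · intro h x h1 h2
    have := h (v0 - x) (by omega) (by omega)
    have e : v0 + (-1) * (v0 - x) = x := by ring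
    rwa [e] at this

lemma quant_shift_up (Q : Int → Prop) (v0 n : Int) :
    (∀ x : Int, v0 + 1 ≤ x → x < v0 + 1 + n → ¬ Q x) ↔
      (∀ i : Int, 1 ≤ i → i < n + 1 → ¬ Q (v0 + 1 * i)) := by
  constructor
  · intro h i h1 h2
    exact h (v0 + 1 * i) (by omega) (by omega)
  · intro h x h1 h2
    have := h (x - v0) (by omega) (by omega)
    have e : v0 + 1 * (x - v0) = x := by ring
    rwa [e] at this

-- characterization of stepB, one lemma per direction letter
lemma stepB_N (rowx colx : List (List Int)) (rows cols : Int) (p : Int × Int) (route : String)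
    (hr0 : PySem.Str.pyGet? route 0 = some 'N') :
    stepB rowx colx rows cols p route =
      (if 0 ≤ p.1 - (PySem.Int.ofChars? [(PySem.Str.pyGet? route 2).getD ' ']).getD 0 ∧
          at2 colx p.1 p.2 - at2 colx (p.1 - (PySem.Int.ofChars? [(PySem.Str.pyGet? route 2).getD ' ']).getD 0) p.2 = 0
       then (p.1 - (PySem.Int.ofChars? [(PySem.Str.pyGet? route 2).getD ' ']).getD 0, p.2) else p) := by
  have hr0' : PySem.List.pyGet? route.toList 0 = some 'N' := by simpa using hr0
  simp [stepB, hr0']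

lemma stepB_S (rowx colx : List (List Int)) (rows cols : Int) (p : Int × Int) (route : String)
    (hr0 : PySem.Str.pyGet? route 0 = some 'S') :
    stepB rowx colx rows cols p route =
      (if p.1 + (PySem.Int.ofChars? [(PySem.Str.pyGet? route 2).getD ' ']).getD 0 < rows ∧
          at2 colx (p.1 + 1 + (PySem.Int.ofChars? [(PySem.Str.pyGet? route 2).getD ' ']).getD 0) p.2 - at2 colx (p.1 + 1) p.2 = 0
       then (p.1 + (PySem.Int.ofChars? [(PySem.Str.pyGet? route 2).getD ' ']).getD 0, p.2) else p) := by
  have hr0' : PySem.List.pyGet? route.toList 0 = some 'S' := by simpa using hr0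
  simp [stepB, hr0']

lemma stepB_W (rowx colx : List (List Int)) (rows cols : Int) (p : Int × Int) (route : String)
    (hr0 : PySem.Str.pyGet? route 0 = some 'W') :
    stepB rowx colx rows cols p route =
      (if 0 ≤ p.2 - (PySem.Int.ofChars? [(PySem.Str.pyGet? route 2).getD ' ']).getD 0 ∧
          at2 rowx p.1 p.2 - at2 rowx p.1 (p.2 - (PySem.Int.ofChars? [(PySem.Str.pyGet? route 2).getD ' ']).getD 0) = 0
       then (p.1, p.2 - (PySem.Int.ofChars? [(PySem.Str.pyGet? route 2).getD ' ']).getD 0) else p) := by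
  have hr0' : PySem.List.pyGet? route.toList 0 = some 'W' := by simpa using hr0
  simp [stepB, hr0']

lemma stepB_E (rowx colx : List (List Int)) (rows cols : Int) (p : Int × Int) (route : String)
    (hr0 : PySem.Str.pyGet? route 0 = some 'E') :
    stepB rowx colx rows cols p route =
      (if p.2 + (PySem.Int.ofChars? [(PySem.Str.pyGet? route 2).getD ' ']).getD 0 < cols ∧
          at2 rowx p.1 (p.2 + 1 + (PySem.Int.ofChars? [(PySem.Str.pyGet? route 2).getD ' ']).getD 0) - at2 rowx p.1 (p.2 + 1) = 0
       then (p.1, p.2 + (PySem.Int.ofChars? [(PySem.Str.pyGet? route 2).getD ' ']).getD 0) else p) := by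
  have hr0' : PySem.List.pyGet? route.toList 0 = some 'E' := by simpa using hr0
  simp [stepB, hr0']

lemma stepB_skip (rowx colx : List (List Int)) (rows cols : Int) (p : Int × Int) (route : String)
    (c0 : Char) (hr0 : PySem.Str.pyGet? route 0 = some c0)
    (hN : ¬ c0 = 'N') (hS : ¬ c0 = 'S') (hW : ¬ c0 = 'W') (hE : ¬ c0 = 'E') :
    stepB rowx colx rows cols p route = p := by
  have hr0' : PySem.List.pyGet? route.toList 0 = some c0 := by simpa using hr0
  simp [stepB, hr0', hN, hS, hW, hE]

-- one route: the two steps agree and preserve the invariant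
lemma pv_step_eq (park : List String) (route : String)
    (hrect : ∀ s ∈ park, PySem.Str.len s = PySem.Str.len ((PySem.List.pyGet? park 0).getD ""))
    (hlen : 3 ≤ PySem.Str.len route)
    (hdig : route.toList.getD 2 ' ' ∈ ['0','1','2','3','4','5','6','7','8','9'])
    (p : Int × Int) (hp : pvInB park p) :
    stepA park ((park.length : Int) - 1) (pvCols park - 1) p route
      = stepB (rowxB park) (colxB park (pvCols park)) (park.length : Int) (pvCols park) p route
    ∧ pvInB park (stepB (rowxB park) (colxB park (pvCols park)) (park.length : Int) (pvCols park) p route) := by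
  obtain ⟨c0, c1, c2, rest, hT⟩ : ∃ c0 c1 c2 rest, route.toList = c0 :: c1 :: c2 :: rest := by
    have h3 : 3 ≤ route.toList.length := by
      have := hlen; rw [PySem.Str.len_eq] at this; exact_mod_cast this
    rcases ht0 : route.toList with _ | ⟨c0, t0⟩
    · rw [ht0] at h3; simp at h3
    · rcases ht1 : t0 with _ | ⟨c1, t1⟩
      · rw [ht0, ht1] at h3; simp at h3
      · rcases ht2 : t1 with _ | ⟨c2, t2⟩
        · rw [ht0, ht1, ht2] at h3; simp at h3
        · exact ⟨c0, c1, c2, t2, rfl⟩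
  have hr0 : PySem.Str.pyGet? route 0 = some c0 := by simp [hT]
  have hr2 : PySem.Str.pyGet? route 2 = some c2 := by
    have h2 : (2 : Int) ≤ (rest.length : Int) + 1 + 1 := by omega
    simp [hT, PySem.List.pyGet?, PySem.List.pyIdx?, h2]
  have hc2 : route.toList.getD 2 ' ' = c2 := by simp [hT]
  rw [hc2] at hdig
  set n : Int := (PySem.Int.ofChars? [(PySem.Str.pyGet? route 2).getD ' ']).getD 0 with hn
  have hn0 : 0 ≤ n := by
    rw [hn, hr2]; exact pv_digit_nonneg c2 hdig
  -- number of columns as a Nat, and rectangularity on the List Char side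
  set colsN : Nat := ((PySem.List.pyGet? park 0).getD "").toList.length with hcolsN
  have hcols : pvCols park = (colsN : Int) := by
    rw [pvCols, PySem.Str.len_eq]
  have hrectN : ∀ s ∈ park, s.toList.length = colsN := by
    intro s hs
    have := hrect s hs
    rw [PySem.Str.len_eq, PySem.Str.len_eq] at this
    exact_mod_cast this
  obtain ⟨hx0, hx1, hy0, hy1⟩ : 0 ≤ p.1 ∧ p.1 < (park.length : Int) ∧ 0 ≤ p.2 ∧ p.2 < pvCols park := hp
  have hy1' : p.2.toNat < colsN := by omega
  by_cases hcN : c0 = 'N'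
  · subst hcN
    rw [pv_stepA_NS park _ _ p route 'N' (-1) hr0 (by simp) (Or.inl rfl) (by simp), ← hn,
        hcols, stepB_N _ _ _ _ p route hr0, ← hn]
    have hiff := pv_cond_iff (-1) (park.length : Int) p.1 n (Or.inr rfl) hn0 hx0 hx1
      (fun v => pvCell park v p.2)
    have hscan : 0 ≤ p.1 - n →
        ((at2 (colxB park (colsN : Int)) p.1 p.2 - at2 (colxB park (colsN : Int)) (p.1 - n) p.2 = 0)
          ↔ ∀ i : Int, 1 ≤ i → i < n + 1 → ¬ pvCell park (p.1 + (-1) * i) p.2 = some 'X') := by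
      intro h0
      rw [colDiff_iff park colsN hrectN p.2 (p.1 - n) p.1 h0 (by omega) (by omega) hy0 hy1']
      exact quant_shift_down (fun x => pvCell park x p.2 = some 'X') p.1 n
    by_cases hA : ∀ i : ℕ, 1 ≤ i → i ≤ n.toNat →
        ¬ (p.1 + -1 * (i : Int) < 0 ∨ (park.length : Int) - 1 < p.1 + -1 * (i : Int) ∨
            pvCell park (p.1 + -1 * (i : Int)) p.2 = some 'X')
    · obtain ⟨hb1, hb2, hcell⟩ := hiff.mp hA
      have h0 : 0 ≤ p.1 - n := by omega
      rw [if_pos hA, if_pos ⟨h0, (hscan h0).mpr hcell⟩]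
      refine ⟨by rw [show p.1 + -1 * n = p.1 - n by ring], ⟨by omega, by omega, hy0, by omega⟩⟩
    · rw [if_neg hA, if_neg ?_]
      · exact ⟨rfl, hx0, hx1, hy0, hy1⟩
      · rintro ⟨h0, hd0⟩
        exact hA (hiff.mpr ⟨by omega, by omega, (hscan h0).mp hd0⟩)
  by_cases hcS : c0 = 'S'
  · subst hcS
    rw [pv_stepA_NS park _ _ p route 'S' 1 hr0 (by simp) (Or.inr rfl) (by simp), ← hn,
        hcols, stepB_S _ _ _ _ p route hr0, ← hn]
    have hiff := pv_cond_iff 1 (park.length : Int) p.1 n (Or.inl rfl) hn0 hx0 hx1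
      (fun v => pvCell park v p.2)
    have hscan : p.1 + n < (park.length : Int) →
        ((at2 (colxB park (colsN : Int)) (p.1 + 1 + n) p.2 - at2 (colxB park (colsN : Int)) (p.1 + 1) p.2 = 0)
          ↔ ∀ i : Int, 1 ≤ i → i < n + 1 → ¬ pvCell park (p.1 + 1 * i) p.2 = some 'X') := by
      intro hb
      rw [colDiff_iff park colsN hrectN p.2 (p.1 + 1) (p.1 + 1 + n) (by omega) (by omega) (by omega) hy0 hy1']
      exact quant_shift_up (fun x => pvCell park x p.2 = some 'X') p.1 n
    by_cases hA : ∀ i : ℕ, 1 ≤ i → i ≤ n.toNat →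
        ¬ (p.1 + 1 * (i : Int) < 0 ∨ (park.length : Int) - 1 < p.1 + 1 * (i : Int) ∨
            pvCell park (p.1 + 1 * (i : Int)) p.2 = some 'X')
    · obtain ⟨hb1, hb2, hcell⟩ := hiff.mp hA
      have hb : p.1 + n < (park.length : Int) := by omega
      rw [if_pos hA, if_pos ⟨hb, (hscan hb).mpr hcell⟩]
      refine ⟨by rw [show p.1 + 1 * n = p.1 + n by ring], ⟨by omega, by omega, hy0, by omega⟩⟩
    · rw [if_neg hA, if_neg ?_]
      · exact ⟨rfl, hx0, hx1, hy0, hy1⟩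
      · rintro ⟨hb, hd0⟩
        exact hA (hiff.mpr ⟨by omega, by omega, (hscan hb).mp hd0⟩)
  by_cases hcE : c0 = 'E'
  · subst hcE
    rw [pv_stepA_EW park _ _ p route 'E' 1 hr0 (by simp) (by simp) (Or.inl rfl), ← hn,
        hcols, stepB_E _ _ _ _ p route hr0, ← hn]
    have hx1' : p.1.toNat < park.length := by omega
    have hiff := pv_cond_iff 1 ((colsN : Nat) : Int) p.2 n (Or.inl rfl) hn0 hy0 (by omega)
      (fun v => pvCell park p.1 v)
    have hscan : p.2 + n < ((colsN : Nat) : Int) →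
        ((at2 (rowxB park) p.1 (p.2 + 1 + n) - at2 (rowxB park) p.1 (p.2 + 1) = 0)
          ↔ ∀ i : Int, 1 ≤ i → i < n + 1 → ¬ pvCell park p.1 (p.2 + 1 * i) = some 'X') := by
      intro hb
      rw [rowDiff_iff park colsN hrectN p.1 (p.2 + 1) (p.2 + 1 + n) hx0 hx1' (by omega) (by omega) (by omega)]
      exact quant_shift_up (fun y => pvCell park p.1 y = some 'X') p.2 n
    by_cases hA : ∀ i : ℕ, 1 ≤ i → i ≤ n.toNat →
        ¬ (p.2 + 1 * (i : Int) < 0 ∨ pvCols park - 1 < p.2 + 1 * (i : Int) ∨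
            pvCell park p.1 (p.2 + 1 * (i : Int)) = some 'X')
    · rw [hcols] at hA
      obtain ⟨hb1, hb2, hcell⟩ := hiff.mp hA
      have hb : p.2 + n < ((colsN : Nat) : Int) := by omega
      rw [if_pos hA, if_pos ⟨hb, (hscan hb).mpr hcell⟩]
      refine ⟨by rw [show p.2 + 1 * n = p.2 + n by ring], ⟨hx0, hx1, by omega, by omega⟩⟩
    · rw [hcols] at hA
      rw [if_neg hA, if_neg ?_]
      · exact ⟨rfl, hx0, hx1, hy0, by omega⟩
      · rintro ⟨hb, hd0⟩
        exact hA (hiff.mpr ⟨by omega, by omega, (hscan hb).mp hd0⟩)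
  by_cases hcW : c0 = 'W'
  · subst hcW
    rw [pv_stepA_EW park _ _ p route 'W' (-1) hr0 (by simp) (by simp) (Or.inr rfl), ← hn,
        hcols, stepB_W _ _ _ _ p route hr0, ← hn]
    have hx1' : p.1.toNat < park.length := by omega
    have hiff := pv_cond_iff (-1) ((colsN : Nat) : Int) p.2 n (Or.inr rfl) hn0 hy0 (by omega)
      (fun v => pvCell park p.1 v)
    have hscan : 0 ≤ p.2 - n →
        ((at2 (rowxB park) p.1 p.2 - at2 (rowxB park) p.1 (p.2 - n) = 0)
          ↔ ∀ i : Int, 1 ≤ i → i < n + 1 → ¬ pvCell park p.1 (p.2 + (-1) * i) = some 'X') := by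
      intro h0
      rw [rowDiff_iff park colsN hrectN p.1 (p.2 - n) p.2 hx0 hx1' h0 (by omega) (by omega)]
      exact quant_shift_down (fun y => pvCell park p.1 y = some 'X') p.2 n
    by_cases hA : ∀ i : ℕ, 1 ≤ i → i ≤ n.toNat →
        ¬ (p.2 + -1 * (i : Int) < 0 ∨ pvCols park - 1 < p.2 + -1 * (i : Int) ∨
            pvCell park p.1 (p.2 + -1 * (i : Int)) = some 'X')
    · rw [hcols] at hA
      obtain ⟨hb1, hb2, hcell⟩ := hiff.mp hA
      have h0 : 0 ≤ p.2 - n := by omega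
      rw [if_pos hA, if_pos ⟨h0, (hscan h0).mpr hcell⟩]
      refine ⟨by rw [show p.2 + -1 * n = p.2 - n by ring], ⟨hx0, hx1, by omega, by omega⟩⟩
    · rw [hcols] at hA
      rw [if_neg hA, if_neg ?_]
      · exact ⟨rfl, hx0, hx1, hy0, by omega⟩
      · rintro ⟨h0, hd0⟩
        exact hA (hiff.mpr ⟨by omega, by omega, (hscan h0).mp hd0⟩)
  · rw [pv_stepA_skip park _ _ p route c0 hr0 (by simp [hcN, hcS]) (by simp [hcE, hcW]),
        stepB_skip _ _ _ _ p route c0 hr0 hcN hcS hcW hcE]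
    exact ⟨rfl, hx0, hx1, hy0, hy1⟩

-- fold two functions that agree on an invariant-preserving trajectory
lemma pv_foldl_eq_of_inv {α σ : Type} (f g : σ → α → σ) (P : σ → Prop) :
    ∀ (l : List α) (s : σ), P s →
      (∀ a ∈ l, ∀ t, P t → f t a = g t a ∧ P (g t a)) →
      l.foldl f s = l.foldl g s := by
  intro l
  induction l with
  | nil => intro s _ _; rfl
  | cons a t ih =>
    intro s hs h
    obtain ⟨he, hp⟩ := h a (by simp) s hs
    simp only [List.foldl_cons, he]
    exact ih _ hp (fun b hb => h b (by simp [hb]))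

-- the first row containing "S", as an Option (proof-side view of both find_start loops)
def fsOpt (l : List (Int × String)) : Option (Int × Int) :=
  l.findSome? (fun p =>
    if PySem.Str.isIn "S" p.2 then some (p.1, PySem.Str.find p.2 "S") else none)

-- A's find_start loop agrees with fsOpt
lemma pv_fsA_aux :
    ∀ (post pre : List String),
      findStartA (pre ++ post) (PySem.List.pyRange (pre.length : Int) (((pre ++ post).length : Int)) 1)
        = (PySem.List.enumerate post (pre.length : Int)).findSome?
            (fun p => if PySem.Str.isIn "S" p.2 then some (p.1, PySem.Str.find p.2 "S") else none) := by
  intro post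
  induction post with
  | nil =>
    intro pre
    rw [PySem.List.pyRange_one_eq_nil (by simp)]
    rfl
  | cons st rest ih =>
    intro pre
    have hlt : (pre.length : Int) < ((pre ++ st :: rest).length : Int) := by
      simp
    rw [PySem.List.pyRange_one_cons hlt]
    show (if PySem.Str.isIn "S" ((PySem.List.pyGet? (pre ++ st :: rest) (pre.length : Int)).getD "")
          then some ((pre.length : Int), PySem.Str.find ((PySem.List.pyGet? (pre ++ st :: rest) (pre.length : Int)).getD "") "S")
          else findStartA (pre ++ st :: rest) (PySem.List.pyRange ((pre.length : Int) + 1) (((pre ++ st :: rest).length : Int)) 1)) = _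
    rw [PySem.List.pyGet?_append_length]
    rw [PySem.List.enumerate_cons, List.findSome?_cons]
    by_cases hin : PySem.Str.isIn "S" st
    · have hin' : PySem.Chars.isIn ['S'] st.toList = true := by simpa using hin
      simp [hin']
    · simp only [Option.getD_some, hin, if_neg, Bool.false_eq_true, not_false_eq_true]
      have hre : pre ++ st :: rest = (pre ++ [st]) ++ rest := by simp
      have hlen1 : (pre.length : Int) + 1 = (((pre ++ [st]).length : ℕ) : Int) := by
        simp
      rw [hre, hlen1]
      exact ih (pre ++ [st])

lemma pv_findStart_eq (park : List String) :
    findStartA park (PySem.List.pyRange 0 (park.length : Int) 1)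
      = fsOpt (PySem.List.enumerate park) := by
  have := pv_fsA_aux park []
  simpa [fsOpt] using this

-- B's find-start loop returns what fsOpt finds
lemma findStartB_fsOpt : ∀ (l : List (Int × String)) (rc : Int × Int),
    fsOpt l = some rc → findStartB l = rc := by
  intro l
  induction l with
  | nil => intro rc h; simp [fsOpt] at h
  | cons p rest ih =>
    intro rc h
    obtain ⟨i, row⟩ := p
    rw [fsOpt, List.findSome?_cons] at h
    by_cases hin : PySem.Str.isIn "S" row = true
    · simp only [hin, if_true] at h
      obtain rfl : ((i, PySem.Str.find row "S") : Int × Int) = rc := Option.some.inj h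
      have hne : PySem.Str.find row "S" ≠ -1 := by
        rw [PySem.Str.find_ne_neg_one_iff]
        exact (PySem.Str.isIn_iff_infix "S" row).mp hin
      show (if PySem.Str.find row "S" ≠ -1 then ((i, PySem.Str.find row "S") : Int × Int)
            else findStartB rest) = _
      rw [if_pos hne]
    · simp only [hin, Bool.false_eq_true, if_false] at h
      have hne : ¬ PySem.Str.find row "S" ≠ -1 := by
        simp only [ne_eq, not_not, PySem.Str.find_eq_neg_one_iff]
        intro hc
        exact hin ((PySem.Str.isIn_iff_infix "S" row).mpr hc)
      show (if PySem.Str.find row "S" ≠ -1 then ((i, PySem.Str.find row "S") : Int × Int)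
            else findStartB rest) = _
      rw [if_neg hne]
      exact ih rc h

-- a park containing "S" has a fsOpt-hit
lemma fsOpt_exists (park : List String)
    (hS : ∃ s ∈ park, PySem.Str.isIn "S" s = true) :
    ∃ rc, fsOpt (PySem.List.enumerate park) = some rc := by
  obtain ⟨s, hs, hin⟩ := hS
  rw [List.mem_iff_getElem] at hs
  obtain ⟨k, hk, rfl⟩ := hs
  cases h : fsOpt (PySem.List.enumerate park) with
  | some rc => exact ⟨rc, rfl⟩
  | none =>
    exfalso
    unfold fsOpt at h
    rw [List.findSome?_eq_none_iff] at h
    have hmem : ((0 : Int) + (k : Int), park[k]) ∈ PySem.List.enumerate park := by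
      rw [PySem.List.mem_enumerate_iff]
      exact ⟨k, hk, rfl⟩
    have := h _ hmem
    have hin' : PySem.Chars.isIn ['S'] park[k].toList = true := by simpa using hin
    simp [hin'] at this

-- the found start is inside the grid
lemma pv_start_inB (park : List String)
    (hrect : ∀ s ∈ park, PySem.Str.len s = PySem.Str.len ((PySem.List.pyGet? park 0).getD ""))
    (rc : Int × Int) (h : fsOpt (PySem.List.enumerate park) = some rc) : pvInB park rc := by
  rw [fsOpt] at h
  obtain ⟨p, hmem, hF⟩ := List.exists_of_findSome?_eq_some h
  rw [PySem.List.mem_enumerate_iff] at hmem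
  obtain ⟨k, hk, rfl⟩ := hmem
  by_cases hin : PySem.Str.isIn "S" park[k]
  · rw [if_pos hin] at hF
    obtain rfl : ((0 : Int) + (k : Int), PySem.Str.find park[k] "S") = rc := Option.some.inj hF
    have hfind0 : 0 ≤ PySem.Str.find park[k] "S" := by
      rw [PySem.Str.find_nonneg_iff]
      rw [PySem.Str.isIn_iff_infix] at hin
      exact hin
    have hfind1 : PySem.Str.find park[k] "S" < (park[k].toList.length : Int) := by
      have hspec := PySem.Chars.find_spec (s := park[k].toList) (sub := "S".toList)
        (by simpa using hfind0)
      have hpre := hspec.1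
      have hne : park[k].toList.drop (PySem.Chars.find park[k].toList "S".toList).toNat ≠ [] := by
        intro hnil
        rw [hnil] at hpre
        simp [List.IsPrefix] at hpre
      have hlt : (PySem.Chars.find park[k].toList "S".toList).toNat < park[k].toList.length := by
        by_contra hge
        push_neg at hge
        exact hne (List.drop_eq_nil_of_le hge)
      have hfe : PySem.Str.find park[k] "S" = PySem.Chars.find park[k].toList "S".toList := by
        simp
      rw [hfe]
      omega
    have hcols : (park[k].toList.length : Int) = pvCols park := by
      have := hrect park[k] (by simp)
      rw [PySem.Str.len_eq] at this
      rw [this]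
      rfl
    refine ⟨by simp, by simp [hk], by simpa using hfind0, ?_⟩
    simp only []
    rw [← hcols]
    simpa using hfind1
  · rw [if_neg hin] at hF
    exact absurd hF (by simp)

-- ===== VERDICT (by name: the statement is the Claim_ definition above) =====
theorem solution_spec : Claim_equal_solution := by
  intro park routes _hdom hpre
  obtain ⟨hne, hS, hrest⟩ := hpre
  obtain ⟨rc0, hfs⟩ := fsOpt_exists park hS
  have hA : findStartA park (PySem.List.pyRange 0 (park.length : Int) 1) = some rc0 :=
    (pv_findStart_eq park).trans hfs
  have hB : findStartB (PySem.List.enumerate park) = rc0 :=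
    findStartB_fsOpt _ _ hfs
  rcases hrest with rfl | ⟨hrect, hroutes⟩
  · simp [Spec_solution, solution, solution_alt, hA, hB]
  · have hinb : pvInB park rc0 := pv_start_inB park hrect rc0 hfs
    have hfold : routes.foldl (stepA park ((park.length : Int) - 1) (pvCols park - 1)) rc0
        = routes.foldl (stepB (rowxB park) (colxB park (pvCols park)) (park.length : Int) (pvCols park)) rc0 := by
      apply pv_foldl_eq_of_inv _ _ (pvInB park) routes rc0 hinb
      intro r hr t ht
      exact pv_step_eq park r hrect (hroutes r hr).1 (hroutes r hr).2 t ht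
    simp only [pvCols, PySem.Str.len_eq, String.length_toList] at hfold
    simp [Spec_solution, solution, solution_alt, hA, hB, hfold]
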